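-- pv_equiv track=rewrite | github.com/lamhuynhb779/crawler | boolean_model/boolean_model.py | indexing
-- ===== SOURCE A (Python) =====
-- def indexing(terms, docIds):
--     numCurrentDoc = 1
--     for i in range(0, len(terms)):
--         if terms[i]==" ":
--             numCurrentDoc += 1
--         else:
--             docIds.append(numCurrentDoc)
--     return terms, docIds
-- ===== SOURCE B (Python) =====
-- def indexing(terms, docIds):
--     # Group terms into segments separated by " " markers, then extend docIds
--     # with each segment's document number by repetition. Mutates docIds in the
--     # same way A does (same elements appended in the same order).
--     segments = [[]]
--     for t in terms:
--         if t == " ":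
--             segments.append([])
--         else:
--             segments[-1].append(t)
--     for i, seg in enumerate(segments, start=1):
--         docIds.extend([i] * len(seg))
--     return terms, docIds
-- ===== Notes on version B (the rewrite author's own statement) =====
-- stated objective: alternative
-- what changed: Replaces A's per-element counter loop (increment on ' ', append otherwise) with a group-by decomposition: first split the list into segments at ' ' markers, then extend docIds with each 1-based segment number repeated len(segment) times.
import Mathlib
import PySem

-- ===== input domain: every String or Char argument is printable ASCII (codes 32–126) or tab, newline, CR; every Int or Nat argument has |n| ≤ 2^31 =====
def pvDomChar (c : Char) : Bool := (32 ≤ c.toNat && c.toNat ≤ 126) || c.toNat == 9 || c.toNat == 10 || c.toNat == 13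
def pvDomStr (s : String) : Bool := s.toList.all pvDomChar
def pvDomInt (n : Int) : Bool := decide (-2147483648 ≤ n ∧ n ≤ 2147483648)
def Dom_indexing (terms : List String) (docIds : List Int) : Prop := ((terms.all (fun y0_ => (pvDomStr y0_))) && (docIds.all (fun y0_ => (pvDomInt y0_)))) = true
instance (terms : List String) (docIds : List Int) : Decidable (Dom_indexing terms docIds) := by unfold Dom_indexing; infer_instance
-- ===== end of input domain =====

-- B replaces A's per-element counter loop by a group-by-segment decomposition
-- (split at " " markers, then extend by repetition); alternative, not faster.
-- Both Pythons mutate docIds identically (same appends); the equivalence proved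
-- here is about the return value.


-- ===== PORT A =====
-- A's for-loop over terms with state (numCurrentDoc, docIds)
def indexingLoop : List String → Int → List Int → List Int
  | [], _, d => d
  | t :: ts, n, d =>
    if t == " " then indexingLoop ts (n + 1) d
    else indexingLoop ts n (d ++ [n])

def indexing (terms : List String) (docIds : List Int) : List String × List Int :=
  (terms, indexingLoop terms 1 docIds)

-- ===== PORT B =====
-- B's first loop: split into segments at " " markers (segments[-1].append / append [])
def buildSegs : List String → List (List String) → List (List String)
  | [], segs => segs
  | t :: ts, segs =>
    if t == " " then buildSegs ts (segs ++ [[]])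
    else buildSegs ts (segs.dropLast ++ [segs.getLastD [] ++ [t]])

-- B's second loop: enumerate(segments, start=1), docIds.extend([i] * len(seg))
def extendIds : List (List String) → Int → List Int → List Int
  | [], _, d => d
  | seg :: ss, i, d => extendIds ss (i + 1) (d ++ List.replicate seg.length i)

def indexing_alt (terms : List String) (docIds : List Int) : List String × List Int :=
  (terms, extendIds (buildSegs terms [[]]) 1 docIds)

-- ===== PRECONDITION & SPEC =====
def Spec_indexing (terms : List String) (docIds : List Int) (out : List String × List Int) : Prop := out = indexing_alt terms docIds
instance (terms : List String) (docIds : List Int) (out : List String × List Int) : Decidable (Spec_indexing terms docIds out) := by unfold Spec_indexing; infer_instance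

-- ===== CLAIM (what is proved, stated in full; the proofs are below) =====
def Claim_equal_indexing : Prop := ∀ (terms : List String) (docIds : List Int), Dom_indexing terms docIds → Spec_indexing terms docIds (indexing terms docIds)

-- ===== LEMMAS AND PROOFS =====

theorem extendIds_append (xs ys : List (List String)) (i : Int) (d : List Int) :
    extendIds (xs ++ ys) i d = extendIds ys (i + xs.length) (extendIds xs i d) := by
  induction xs generalizing i d with
  | nil => simp [extendIds]
  | cons x xs ih =>
    simp only [List.cons_append, extendIds, ih, List.length_cons]
    congr 1
    push_cast
    ring

theorem main_lemma (ts : List String) (i : Int) :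
    ∀ (pre : List (List String)) (cur : List String) (d : List Int),
      extendIds (buildSegs ts (pre ++ [cur])) i d
        = indexingLoop ts (i + pre.length)
            (extendIds pre i d ++ List.replicate cur.length (i + pre.length)) := by
  induction ts with
  | nil =>
    intro pre cur d
    simp [buildSegs, indexingLoop, extendIds_append, extendIds]
  | cons t ts ih =>
    intro pre cur d
    by_cases h : t == " "
    · -- space: open a new empty segment
      simp only [buildSegs, h, if_pos, indexingLoop]
      have h2 := ih (pre ++ [cur]) [] d
      rw [extendIds_append] at h2
      simp only [extendIds, List.length_nil, List.replicate_zero, List.append_nil,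
        List.length_append, List.length_cons, List.append_assoc, Nat.cast_add,
        Nat.cast_one, zero_add, add_assoc] at h2 ⊢
      exact h2
    · -- non-space: append t to the current segment
      simp only [buildSegs, h, if_neg, indexingLoop, Bool.false_eq_true, not_false_iff]
      rw [List.dropLast_concat, List.getLastD_concat]
      rw [ih pre (cur ++ [t]) d]
      simp [List.replicate_succ']

-- ===== VERDICT (by name: the statement is the Claim_ definition above) =====
theorem indexing_spec : Claim_equal_indexing := by
  intro terms docIds _
  show indexing terms docIds = indexing_alt terms docIds
  unfold indexing indexing_alt
  have := main_lemma terms 1 [] [] docIds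
  simp [extendIds] at this
  rw [this]
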